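-- pv_equiv track=rewrite | github.com/cobaltt7/python-exercises | 3 puzzles/60-62.py | sixty
-- ===== SOURCE A (Python) =====
-- from math import floor
--
-- def sixty(data):
--     """
--     Write a Python program to find a list of all numbers that are adjacent to a prime number in the
--     list, sorted without duplicates.
--     """
--
--     def isPrime(number):
--         if number < 2:
--             return False
--         for i in range(2, floor(number / 2) + 1):
--             if number % i == 0:
--                 return False
--         return True
--
--     output = [
--         entry[1]
--         for entry in enumerate(data)
--         if (entry[0] > 0 and isPrime(data[entry[0] - 1]))
--         or (entry[0] + 1 != len(data) and isPrime(data[entry[0] + 1]))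
--     ]
--     return sorted(set(output))
-- ===== SOURCE B (Python) =====
-- def sixty(data):
--     """Scatter from primes to their neighbours via an index set, instead of
--     testing each element's neighbours; then sort the distinct values."""
--
--     def is_prime(number):
--         if number < 2:
--             return False
--         for i in range(2, number // 2 + 1):
--             if number % i == 0:
--                 return False
--         return True
--
--     n = len(data)
--     adjacent = set()
--     for i in range(n):
--         if is_prime(data[i]):
--             if i > 0:
--                 adjacent.add(i - 1)
--             if i + 1 < n:
--                 adjacent.add(i + 1)
--     return sorted({data[i] for i in adjacent})
-- ===== Notes on version B (the rewrite author's own statement) =====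
-- stated objective: alternative
-- what changed: B scatters outward from each prime index to a set of neighbour indices (one primality test per element) instead of A's gather pass that primality-tests both neighbours of every element, then sorts the distinct values at those indices.
import Mathlib
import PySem

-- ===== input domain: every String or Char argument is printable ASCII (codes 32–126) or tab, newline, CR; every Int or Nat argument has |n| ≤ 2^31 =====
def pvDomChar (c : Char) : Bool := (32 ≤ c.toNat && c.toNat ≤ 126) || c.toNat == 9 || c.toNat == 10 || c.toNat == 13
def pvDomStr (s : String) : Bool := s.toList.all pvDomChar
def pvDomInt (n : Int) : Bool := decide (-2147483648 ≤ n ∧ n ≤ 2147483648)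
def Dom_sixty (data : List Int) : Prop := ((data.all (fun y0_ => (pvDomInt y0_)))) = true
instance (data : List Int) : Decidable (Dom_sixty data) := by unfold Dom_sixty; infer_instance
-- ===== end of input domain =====

-- B scatters from each prime index to its neighbours instead of testing both neighbours of
-- every element ('alternative' decomposition, same exact result).

-- ===== PORT A =====
-- shared helper: A's isPrime (floor(number/2) is exact integer halving on the admitted ints)
-- and B's is_prime (number // 2) compute identically, so both ports use this transliteration.
-- the 'for i in range(2, number//2 + 1)' loop, with Python's early 'return False';
-- fuel counts the remaining iterations of the range
def sixtyIsPrimeLoop (number i : Int) (fuel : Nat) : Bool :=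
  match fuel with
  | 0 => true
  | Nat.succ f => if PySem.Int.mod number i == 0 then false else sixtyIsPrimeLoop number (i + 1) f

def sixtyIsPrime (number : Int) : Bool :=
  if number < 2 then false
  else sixtyIsPrimeLoop number 2 ((PySem.Int.floordiv number 2 + 1 - 2).toNat)

def sixty (data : List Int) : List Int :=
  let output := ((PySem.List.enumerate data).filter (fun entry =>
      (decide (0 < entry.1) && sixtyIsPrime (PySem.List.pyGetD data (entry.1 - 1) 0))
      || (decide (entry.1 + 1 ≠ PySem.List.len data) && sixtyIsPrime (PySem.List.pyGetD data (entry.1 + 1) 0)))).map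
      (fun entry => entry.2)
  PySem.List.sorted (PySem.Set.ofList output) id

-- ===== PORT B =====
-- the body of B's for-loop over range(n)
def sixtyAltStep (data : List Int) (n : Int) (s : PySem.Set Int) (i : Int) : PySem.Set Int :=
  if sixtyIsPrime (PySem.List.pyGetD data i 0) then
    (if i + 1 < n then
      PySem.Set.add (if 0 < i then PySem.Set.add s (i - 1) else s) (i + 1)
    else (if 0 < i then PySem.Set.add s (i - 1) else s))
  else s

def sixty_alt (data : List Int) : List Int :=
  let n := PySem.List.len data
  let adjacent := (PySem.List.pyRange 0 n).foldl (sixtyAltStep data n) PySem.Set.empty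
  PySem.List.sorted
    (PySem.Set.ofList (adjacent.map (fun i => PySem.List.pyGetD data i 0))) id

-- ===== PRECONDITION & SPEC =====
def Spec_sixty (data : List Int) (out : List Int) : Prop := out = sixty_alt data
instance (data : List Int) (out : List Int) : Decidable (Spec_sixty data out) := by unfold Spec_sixty; infer_instance

-- ===== CLAIM (what is proved, stated in full; the proofs are below) =====
def Claim_equal_sixty : Prop := ∀ (data : List Int), Dom_sixty data → Spec_sixty data (sixty data)

-- ===== LEMMAS AND PROOFS =====

-- membership in the set built by B's loop
lemma mem_foldl_step (data : List Int) (n : Int) (l : List Int) (s : PySem.Set Int) (i : Int) :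
    i ∈ l.foldl (sixtyAltStep data n) s ↔
      i ∈ s ∨ ∃ j ∈ l, sixtyIsPrime (PySem.List.pyGetD data j 0) = true ∧
        ((0 < j ∧ i = j - 1) ∨ (j + 1 < n ∧ i = j + 1)) := by
  induction l generalizing s with
  | nil => simp
  | cons j t ih =>
    have hstep : ∀ y, y ∈ sixtyAltStep data n s j ↔
        y ∈ s ∨ (sixtyIsPrime (PySem.List.pyGetD data j 0) = true ∧
          ((0 < j ∧ y = j - 1) ∨ (j + 1 < n ∧ y = j + 1))) := by
      intro y
      unfold sixtyAltStep
      split_ifs with hp h2 h1 h1 <;> (try simp only [PySem.Set.mem_add]) <;> tauto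
    rw [List.foldl_cons, ih, hstep]
    simp only [List.mem_cons]
    constructor
    · rintro ((h | h) | ⟨j', hm, hp, hc⟩)
      · exact Or.inl h
      · exact Or.inr ⟨j, Or.inl rfl, h.1, h.2⟩
      · exact Or.inr ⟨j', Or.inr hm, hp, hc⟩
    · rintro (h | ⟨j', rfl | hm, hp, hc⟩)
      · exact Or.inl (Or.inl h)
      · exact Or.inl (Or.inr ⟨hp, hc⟩)
      · exact Or.inr ⟨j', hm, hp, hc⟩

-- a sorted set is determined by its members
lemma sorted_congr_of_perm (l1 l2 : List Int) (h : l1.Perm l2) (h1 : l1.Nodup) :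
    PySem.List.sorted l1 id = PySem.List.sorted l2 id := by
  refine (PySem.List.sorted_eq_of_perm_of_pairwise_lt l2 (PySem.List.sorted l1 id) id ?_ ?_).symm
  · exact (PySem.List.sorted_perm l1 id false).trans h
  · have hle := PySem.List.sorted_pairwise l1 id
    have hnd : (PySem.List.sorted l1 id).Nodup :=
      ((PySem.List.sorted_perm l1 id false).nodup_iff).mpr h1
    have := hle.and hnd
    exact this.imp (fun h => lt_of_le_of_ne h.1 h.2)

-- the two pre-sort value lists have the same members
lemma mem_values_iff (data : List Int) (x : Int) :
    (x ∈ ((PySem.List.enumerate data).filter (fun entry =>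
      (decide (0 < entry.1) && sixtyIsPrime (PySem.List.pyGetD data (entry.1 - 1) 0))
      || (decide (entry.1 + 1 ≠ PySem.List.len data) && sixtyIsPrime (PySem.List.pyGetD data (entry.1 + 1) 0)))).map
      (fun entry => entry.2)) ↔
    (x ∈ ((PySem.List.pyRange 0 (PySem.List.len data)).foldl
        (sixtyAltStep data (PySem.List.len data)) PySem.Set.empty).map
        (fun i => PySem.List.pyGetD data i 0)) := by
  have hL : PySem.List.len data = (data.length : Int) := by simp [PySem.List.len]
  rw [PySem.List.enumerate_eq_map_pyRange data 0, List.filter_map]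
  simp only [List.map_map, List.mem_map, List.mem_filter, Function.comp,
    mem_foldl_step, PySem.Set.empty, List.not_mem_nil, false_or,
    PySem.List.mem_pyRange_one, Bool.or_eq_true, Bool.and_eq_true, decide_eq_true_eq, hL]
  constructor
  · rintro ⟨i, ⟨⟨h0, h1⟩, hc⟩, hx⟩
    rcases hc with ⟨hi0, hp⟩ | ⟨hne, hp⟩
    · exact ⟨i, ⟨i - 1, ⟨by omega, by omega⟩, hp, Or.inr ⟨by omega, by omega⟩⟩, hx⟩
    · exact ⟨i, ⟨i + 1, ⟨by omega, by omega⟩, hp, Or.inl ⟨by omega, by omega⟩⟩, hx⟩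
  · rintro ⟨i, ⟨j, ⟨hj0, hj1⟩, hp, hc⟩, hx⟩
    rcases hc with ⟨hjp, rfl⟩ | ⟨hjn, rfl⟩
    · refine ⟨j - 1, ⟨⟨by omega, by omega⟩, Or.inr ⟨by omega, ?_⟩⟩, hx⟩
      have : j - 1 + 1 = j := by omega
      rw [this]; exact hp
    · refine ⟨j + 1, ⟨⟨by omega, by omega⟩, Or.inl ⟨by omega, ?_⟩⟩, hx⟩
      have : j + 1 - 1 = j := by omega
      rw [this]; exact hp

-- ===== VERDICT (by name: the statement is the Claim_ definition above) =====
theorem sixty_spec : Claim_equal_sixty := by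
  intro data _
  unfold Spec_sixty sixty sixty_alt
  apply sorted_congr_of_perm
  · rw [List.perm_ext_iff_of_nodup (PySem.Set.nodup_ofList _) (PySem.Set.nodup_ofList _)]
    intro a
    rw [PySem.Set.mem_ofList, PySem.Set.mem_ofList]
    exact mem_values_iff data a
  · exact PySem.Set.nodup_ofList _
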